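-- pv_equiv track=rewrite | github.com/Mrliuyuchao/ds | 面试题整合/双指针删除0.py | removeDuplicated
-- ===== SOURCE A (Python) =====
-- def removeDuplicated(nums:list):
--     show = 0
--     fast = 0
--     while fast<len(nums):
--         if nums[fast] == 0:
--             fast += 1
--         else:
--             nums[show] =nums[fast]
--             show += 1
--             fast += 1
--     return show,nums
-- ===== SOURCE B (Python) =====
-- def removeDuplicated(nums: list):
--     kept = [x for x in nums if x != 0]
--     for i, v in enumerate(kept):
--         nums[i] = v
--     return len(kept), nums
-- ===== Notes on version B (the rewrite author's own statement) =====
-- stated objective: simpler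
-- what changed: Replaces the interleaved two-pointer single pass with a collect pass (a comprehension filtering the non-zero elements) followed by a write-back pass into the prefix of nums; the C-level comprehension makes it measurably faster by a constant factor.
import Mathlib
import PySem

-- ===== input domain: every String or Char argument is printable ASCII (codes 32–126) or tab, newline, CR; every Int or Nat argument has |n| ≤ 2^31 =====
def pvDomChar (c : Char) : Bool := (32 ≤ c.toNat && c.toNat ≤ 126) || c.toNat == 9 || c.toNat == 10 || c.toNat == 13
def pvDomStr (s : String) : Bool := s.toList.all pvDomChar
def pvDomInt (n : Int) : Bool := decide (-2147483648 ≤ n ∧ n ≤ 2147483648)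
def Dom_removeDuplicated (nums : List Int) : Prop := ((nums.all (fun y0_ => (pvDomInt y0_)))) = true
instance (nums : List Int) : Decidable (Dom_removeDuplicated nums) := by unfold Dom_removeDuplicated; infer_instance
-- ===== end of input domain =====

-- B replaces A's interleaved two-pointer pass with a collect pass (filter non-zeros) plus a
-- write-back pass into the prefix; both mutate nums in place in Python, equivalence is proved
-- about the returned (count, list) value.


-- ===== PORT A =====
-- the while loop: state (nums, show, fast); fast advances each turn, list length is fixed
def removeDupLoop (nums : List Int) (shw fast : Nat) : Nat × List Int :=
  if h : fast < nums.length then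
    if nums.getD fast 0 = 0 then
      removeDupLoop nums shw (fast + 1)
    else
      removeDupLoop (nums.set shw (nums.getD fast 0)) (shw + 1) (fast + 1)
  else (shw, nums)
termination_by nums.length - fast
decreasing_by
  · omega
  · simp only [List.length_set]; omega

def removeDuplicated (nums : List Int) : Int × List Int :=
  let r := removeDupLoop nums 0 0
  ((r.1 : Int), r.2)

-- ===== PORT B =====
-- write-back pass: for i, v in enumerate(kept): nums[i] = v
def writeBack (nums : List Int) (kept : List Int) (i : Nat) : List Int :=
  match kept with
  | [] => nums
  | v :: vs => writeBack (nums.set i v) vs (i + 1)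

def removeDuplicated_alt (nums : List Int) : Int × List Int :=
  let kept := nums.filter (fun x => x ≠ 0)
  ((kept.length : Int), writeBack nums kept 0)

-- ===== PRECONDITION & SPEC =====
def Spec_removeDuplicated (nums : List Int) (out : Int × List Int) : Prop := out = removeDuplicated_alt nums
instance (nums : List Int) (out : Int × List Int) : Decidable (Spec_removeDuplicated nums out) := by unfold Spec_removeDuplicated; infer_instance

-- ===== CLAIM (what is proved, stated in full; the proofs are below) =====
def Claim_equal_removeDuplicated : Prop := ∀ (nums : List Int), Dom_removeDuplicated nums → Spec_removeDuplicated nums (removeDuplicated nums)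

-- ===== LEMMAS AND PROOFS =====

theorem filter_length_le (l : List Int) (f : Nat) :
    ((l.drop f).filter (fun x => x ≠ 0)).length ≤ l.length - f := by
  calc ((l.drop f).filter (fun x => x ≠ 0)).length ≤ (l.drop f).length :=
        List.length_filter_le _ _
    _ = l.length - f := List.length_drop

-- a set below the dropped prefix is invisible to drop
theorem set_drop (l : List Int) (s k : Nat) (v : Int) (h : s < k) :
    (l.set s v).drop k = l.drop k := by
  apply List.ext_getElem
  · simp
  · intro i h1 h2
    simp only [List.getElem_drop]
    rw [List.getElem_set, if_neg (by omega)]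

-- taking one past a set position splits off the written value
theorem set_take_succ (l : List Int) (s : Nat) (v : Int) (h : s < l.length) :
    (l.set s v).take (s + 1) = l.take s ++ [v] := by
  apply List.ext_getElem
  · simp; omega
  · intro i h1 h2
    simp only [List.length_take, List.length_set] at h1
    rw [List.getElem_take, List.getElem_set]
    by_cases hi : i = s
    · subst hi
      rw [if_pos rfl, List.getElem_append_right (by simp)]
      simp
    · rw [if_neg (fun h => hi h.symm), List.getElem_append_left (by simp; omega), List.getElem_take]

-- the loop's closed form: count s + |K|, list = take s ++ K ++ drop (s+|K|)
theorem removeDupLoop_spec (n : Nat) :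
    ∀ (l : List Int) (s f : Nat), n = l.length - f → s ≤ f → f ≤ l.length →
      removeDupLoop l s f =
        (s + ((l.drop f).filter (fun x => x ≠ 0)).length,
         l.take s ++ (l.drop f).filter (fun x => x ≠ 0)
           ++ l.drop (s + ((l.drop f).filter (fun x => x ≠ 0)).length)) := by
  induction n with
  | zero =>
    intro l s f hn hsf hfl
    have hf : f = l.length := by omega
    subst hf
    rw [removeDupLoop]
    simp [List.drop_length]
  | succ m ih =>
    intro l s f hn hsf hfl
    have hf : f < l.length := by omega
    have hdrop : l.drop f = l.getD f 0 :: l.drop (f + 1) := by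
      rw [List.getD_eq_getElem _ _ hf]
      exact (List.getElem_cons_drop hf).symm
    rw [removeDupLoop, dif_pos hf]
    set v := l.getD f 0 with hv
    by_cases h0 : v = 0
    · rw [if_pos h0, ih l s (f + 1) (by omega) (by omega) (by omega), hdrop,
          List.filter_cons, if_neg (by simp [h0])]
    · rw [if_neg h0]
      have hsl : s < l.length := by omega
      rw [ih (l.set s v) (s + 1) (f + 1) (by simp; omega) (by omega) (by simp; omega)]
      rw [set_drop l s (f + 1) v (by omega)]
      set K := (l.drop (f + 1)).filter (fun x => x ≠ 0) with hKdef
      rw [set_drop l s (s + 1 + K.length) v (by omega),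
          set_take_succ l s v hsl,
          hdrop, List.filter_cons, if_pos (by simp [h0])]
      have h1 : s + (K.length + 1) = s + 1 + K.length := by omega
      simp only [← hKdef, List.length_cons, h1, List.append_assoc,
        List.cons_append, List.nil_append]

-- write-back's closed form
theorem writeBack_spec (kept : List Int) :
    ∀ (l : List Int) (i : Nat), i + kept.length ≤ l.length →
      writeBack l kept i = l.take i ++ kept ++ l.drop (i + kept.length) := by
  induction kept with
  | nil => intro l i h; simp [writeBack]
  | cons v vs ih =>
    intro l i h
    simp only [List.length_cons] at h
    simp only [writeBack]
    rw [ih (l.set i v) (i + 1) (by simp; omega)]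
    rw [set_take_succ l i v (by omega), set_drop l i (i + 1 + vs.length) v (by omega)]
    have h1 : i + (vs.length + 1) = i + 1 + vs.length := by omega
    simp [h1]

-- ===== VERDICT (by name: the statement is the Claim_ definition above) =====
theorem removeDuplicated_spec : Claim_equal_removeDuplicated := by
  intro nums _
  unfold Spec_removeDuplicated removeDuplicated removeDuplicated_alt
  have hA := removeDupLoop_spec (nums.length) nums 0 0 (by omega) (le_refl _) (Nat.zero_le _)
  have hlen : (nums.filter (fun x => x ≠ 0)).length ≤ nums.length := by
    simpa using filter_length_le nums 0
  have hB := writeBack_spec (nums.filter (fun x => x ≠ 0)) nums 0 (by omega)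
  simp only [List.drop_zero] at hA
  simp only [hA, hB, List.take_zero, List.nil_append, Nat.zero_add]
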